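-- pv_equiv track=rewrite | github.com/pypi-data/pypi-mirror-372 | packages/cli-arena/cli_arena-1.2.0.tar.gz/cli_arena-1.2.0/cli_arena/evaluation/advanced_metrics.py | _has_logical_command_order
-- ===== SOURCE A (Python) =====
-- from typing import Dict, List, Optional, Tuple, Any, Set
--
-- def _has_logical_command_order(commands: List[str]) -> bool:
--     """Check if commands are in logical order"""
--     # Look for logical patterns
--     install_before_use = True
--
--     for i, cmd in enumerate(commands):
--         # Check if installation commands come before usage
--         if any(install_cmd in cmd for install_cmd in ['pip install', 'npm install', 'go mod']):
--             # Look ahead for usage of installed packages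
--             for future_cmd in commands[i+1:]:
--                 if any(usage in future_cmd for usage in ['python', 'node', 'go run']):
--                     continue  # Good: install before use
--
--         # Check if setup commands come before tests
--         if 'test' in cmd or 'pytest' in cmd:
--             # Look back for setup commands
--             setup_found = any('install' in prev_cmd or 'setup' in prev_cmd
--                             for prev_cmd in commands[:i])
--             if not setup_found:
--                 install_before_use = False
--
--     return install_before_use
-- ===== SOURCE B (Python) =====
-- def _has_logical_command_order(commands):
--     """Single pass: track whether an install/setup command has been seen;
--     a test command before any such setup makes the order illogical."""
--     setup_seen = False
--     for cmd in commands: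
--         if ('test' in cmd or 'pytest' in cmd) and not setup_seen:
--             return False
--         if 'install' in cmd or 'setup' in cmd:
--             setup_seen = True
--     return True
-- ===== Notes on version B (the rewrite author's own statement) =====
-- stated objective: faster
-- what changed: Replaces A's per-test-command backward scan over all previous commands (and its no-op look-ahead loop) with a single forward pass that maintains one boolean 'setup seen so far' flag and returns early at the first offending test command.
import Mathlib
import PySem

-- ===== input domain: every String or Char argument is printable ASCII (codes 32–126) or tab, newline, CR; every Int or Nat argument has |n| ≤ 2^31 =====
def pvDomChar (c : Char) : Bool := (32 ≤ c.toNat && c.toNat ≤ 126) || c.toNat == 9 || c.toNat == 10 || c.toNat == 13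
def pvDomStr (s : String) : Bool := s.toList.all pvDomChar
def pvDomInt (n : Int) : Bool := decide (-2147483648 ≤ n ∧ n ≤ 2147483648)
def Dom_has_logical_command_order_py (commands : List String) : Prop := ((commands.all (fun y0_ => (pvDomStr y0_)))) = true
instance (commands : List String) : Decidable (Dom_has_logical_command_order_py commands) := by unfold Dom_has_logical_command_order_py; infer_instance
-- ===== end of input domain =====

-- header: B replaces A's quadratic backward scans with one forward pass over the commands.

-- ===== PORT A =====
-- A's condition tests, as helper predicates, exactly A's substring checks.
def pvInstallCmd (cmd : String) : Bool :=
  PySem.Str.isIn "pip install" cmd || PySem.Str.isIn "npm install" cmd || PySem.Str.isIn "go mod" cmd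
def pvUsageCmd (cmd : String) : Bool :=
  PySem.Str.isIn "python" cmd || PySem.Str.isIn "node" cmd || PySem.Str.isIn "go run" cmd
def pvSetupCmd (cmd : String) : Bool :=
  PySem.Str.isIn "install" cmd || PySem.Str.isIn "setup" cmd

def has_logical_command_order_py (commands : List String) : Bool :=
  (PySem.List.enumerate commands 0).foldl
    (fun install_before_use (i, cmd) =>
      -- the first 'if' of A: a look-ahead loop whose body is only 'continue' — has no effect; kept as a discarded value
      let _ := if pvInstallCmd cmd then
        (PySem.List.slice commands (some (i+1)) none).any pvUsageCmd else false
      if PySem.Str.isIn "test" cmd || PySem.Str.isIn "pytest" cmd then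
        if !((PySem.List.slice commands none (some i)).any pvSetupCmd) then false else install_before_use
      else install_before_use)
    true

-- ===== PORT B =====
def has_logical_command_order_py_alt_go (setup_seen : Bool) : List String → Bool
  | [] => true
  | cmd :: rest =>
    if (PySem.Str.isIn "test" cmd || PySem.Str.isIn "pytest" cmd) && !setup_seen then false
    else has_logical_command_order_py_alt_go
      (setup_seen || (PySem.Str.isIn "install" cmd || PySem.Str.isIn "setup" cmd)) rest

def has_logical_command_order_py_alt (commands : List String) : Bool :=
  has_logical_command_order_py_alt_go false commands

-- ===== PRECONDITION & SPEC =====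
-- A is total on the domain: no Pre_ needed.
def Spec_has_logical_command_order_py (commands : List String) (out : Bool) : Prop := out = has_logical_command_order_py_alt commands
instance (commands : List String) (out : Bool) : Decidable (Spec_has_logical_command_order_py commands out) := by unfold Spec_has_logical_command_order_py; infer_instance

-- ===== CLAIM =====
def Claim_equal_has_logical_command_order_py : Prop := ∀ (commands : List String), Dom_has_logical_command_order_py commands → Spec_has_logical_command_order_py commands (has_logical_command_order_py commands)

-- ===== LEMMAS AND PROOFS =====

lemma pv_key (all : List String) :
    ∀ (cs prev : List String) (flag : Bool), all = prev ++ cs →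
    (PySem.List.enumerate cs ((prev.length : Int))).foldl
      (fun install_before_use (i, cmd) =>
        let _ := if pvInstallCmd cmd then
          (PySem.List.slice all (some (i+1)) none).any pvUsageCmd else false
        if PySem.Str.isIn "test" cmd || PySem.Str.isIn "pytest" cmd then
          if !((PySem.List.slice all none (some i)).any pvSetupCmd) then false else install_before_use
        else install_before_use) flag
    = (flag && has_logical_command_order_py_alt_go (prev.any pvSetupCmd) cs) := by
  intro cs
  induction cs with
  | nil =>
    intro prev flag h
    simp [PySem.List.enumerate, has_logical_command_order_py_alt_go]
  | cons c cs' ih =>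
    intro prev flag h
    rw [PySem.List.enumerate_cons]
    have hslice : PySem.List.slice all none (some ((prev.length : Int))) = prev := by
      rw [PySem.List.slice_to_natCast, h, List.take_left]
    have hlen : ((prev.length : Int)) + 1 = (((prev ++ [c]).length : Nat) : Int) := by simp [List.length_append]
    have hall : all = (prev ++ [c]) ++ cs' := by simp [h]
    have := ih (prev ++ [c]) (if PySem.Str.isIn "test" c || PySem.Str.isIn "pytest" c then
          if !(prev.any pvSetupCmd) then false else flag
        else flag) hall
    simp only [List.foldl_cons]
    rw [hlen] at *
    simp only [hslice] at *
    rw [show (List.foldl _ _ (PySem.List.enumerate cs' (((prev ++ [c]).length : Nat) : Int))) = _ from this]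
    have hany : (prev ++ [c]).any pvSetupCmd = (prev.any pvSetupCmd || pvSetupCmd c) := by simp
    rw [hany]
    simp only [has_logical_command_order_py_alt_go, pvSetupCmd]
    by_cases ht : (PySem.Str.isIn "test" c || PySem.Str.isIn "pytest" c) = true <;>
      by_cases hs : prev.any pvSetupCmd = true <;>
      simp [hs] <;> cases flag <;> simp

theorem pv_main (commands : List String) :
    has_logical_command_order_py commands = has_logical_command_order_py_alt commands := by
  have := pv_key commands commands [] true (by simp)
  simpa [has_logical_command_order_py, has_logical_command_order_py_alt] using this

-- ===== VERDICT =====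
theorem has_logical_command_order_py_spec : Claim_equal_has_logical_command_order_py := by
  intro commands _
  exact pv_main commands
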